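-- pv_equiv track=rewrite | github.com/utanashati/twitter-sentiment-analysis | src/utils.py | get_max_lengths
-- ===== SOURCE A (Python) =====
-- def get_max_lengths(tweets_tokd):
-- 	max_words_tweet = 0
-- 	max_chars_word = 0
-- 	for tweet in tweets_tokd:
-- 		if len(tweet) > max_words_tweet:
-- 			max_words_tweet = len(tweet)
-- 		for word in tweet:
-- 			if len(word) > max_chars_word:
-- 				max_chars_word = len(word)
--
-- 	return max_words_tweet, max_chars_word
-- ===== SOURCE B (Python) =====
-- def _dc_max(xs):
--     # max of a list of nonnegative ints by divide and conquer; 0 for empty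
--     n = len(xs)
--     if n == 0:
--         return 0
--     if n == 1:
--         return xs[0]
--     m = n // 2
--     a = _dc_max(xs[:m])
--     b = _dc_max(xs[m:])
--     return a if a >= b else b
--
--
-- def get_max_lengths(tweets_tokd):
--     tweet_lens = []
--     word_lens = []
--     for tweet in tweets_tokd:
--         tweet_lens.append(len(tweet))
--         word_lens.extend(len(word) for word in tweet)
--     return _dc_max(tweet_lens), _dc_max(word_lens)
-- ===== Notes on version B (the rewrite author's own statement) =====
-- stated objective: alternative
-- what changed: Instead of a fused scan maintaining two running maxima, B first materializes the list of tweet lengths and the list of all word lengths, then reduces each to its maximum by recursive divide-and-conquer halving (with 0 for the empty list).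
import Mathlib
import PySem

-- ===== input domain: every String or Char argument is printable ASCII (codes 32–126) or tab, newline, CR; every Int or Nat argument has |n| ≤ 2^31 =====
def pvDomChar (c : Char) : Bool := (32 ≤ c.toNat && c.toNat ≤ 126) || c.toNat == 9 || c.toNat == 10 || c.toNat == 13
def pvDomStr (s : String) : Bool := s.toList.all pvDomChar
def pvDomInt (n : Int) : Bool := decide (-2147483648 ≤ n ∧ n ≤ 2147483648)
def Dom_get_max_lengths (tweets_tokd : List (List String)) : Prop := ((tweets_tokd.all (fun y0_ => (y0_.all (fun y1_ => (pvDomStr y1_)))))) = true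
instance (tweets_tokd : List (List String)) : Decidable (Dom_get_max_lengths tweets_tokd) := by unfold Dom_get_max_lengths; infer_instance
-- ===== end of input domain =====

-- ===== PORT A =====
-- B replaces A's fused running-maximum scan by materialized length lists reduced with divide-and-conquer max (objective: alternative).
def get_max_lengths (tweets_tokd : List (List String)) : Int × Int :=
  tweets_tokd.foldl (fun (acc : Int × Int) tweet =>
    let mw := if PySem.List.len tweet > acc.1 then PySem.List.len tweet else acc.1
    let mc := tweet.foldl (fun mc word =>
      if PySem.Str.len word > mc then PySem.Str.len word else mc) acc.2
    (mw, mc)) (0, 0)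

-- ===== PORT B =====
-- divide-and-conquer maximum of a list of ints (0 for the empty list), as in Source B's _dc_max
def dcMax : List Int → Int
  | [] => 0
  | [x] => x
  | x :: y :: rest =>
      let xs := x :: y :: rest
      let m := xs.length / 2
      let a := dcMax (xs.take m)
      let b := dcMax (xs.drop m)
      if a ≥ b then a else b
termination_by xs => xs.length
decreasing_by
  · simp [List.length_take]; omega
  · simp [List.length_drop]; omega

def get_max_lengths_alt (tweets_tokd : List (List String)) : Int × Int :=
  let lens := tweets_tokd.foldl
    (fun (acc : List Int × List Int) tweet =>
      (acc.1 ++ [PySem.List.len tweet], acc.2 ++ tweet.map (fun w => PySem.Str.len w)))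
    ([], [])
  (dcMax lens.1, dcMax lens.2)

-- ===== PRECONDITION & SPEC =====
def Spec_get_max_lengths (tweets_tokd : List (List String)) (out : Int × Int) : Prop := out = get_max_lengths_alt tweets_tokd
instance (tweets_tokd : List (List String)) (out : Int × Int) : Decidable (Spec_get_max_lengths tweets_tokd out) := by unfold Spec_get_max_lengths; infer_instance

-- ===== CLAIM (what is proved, stated in full; the proofs are below) =====
def Claim_equal_get_max_lengths : Prop := ∀ (tweets_tokd : List (List String)), Dom_get_max_lengths tweets_tokd → Spec_get_max_lengths tweets_tokd (get_max_lengths tweets_tokd)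

-- ===== LEMMAS AND PROOFS =====
theorem foldl_max_shift (xs : List Int) (i j : Int) :
    xs.foldl max (max i j) = max i (xs.foldl max j) := by
  induction xs generalizing i j with
  | nil => rfl
  | cons x t ih =>
      simp only [List.foldl]
      rw [max_assoc, ih]

theorem foldl_max_nonneg (xs : List Int) : 0 ≤ xs.foldl max 0 := by
  have h := foldl_max_shift xs 0 0
  simp only [max_self] at h
  rw [h]
  exact le_max_left _ _

theorem foldl_max_append (a b : List Int) :
    (a ++ b).foldl max 0 = max (a.foldl max 0) (b.foldl max 0) := by
  rw [List.foldl_append]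
  have h : a.foldl max 0 = max (a.foldl max 0) 0 :=
    (max_eq_left (foldl_max_nonneg a)).symm
  conv_lhs => rw [h]
  rw [foldl_max_shift]

theorem dcMaxAux : ∀ (n : ℕ) (xs : List Int), xs.length ≤ n → (∀ x ∈ xs, 0 ≤ x) →
    dcMax xs = xs.foldl max 0 := by
  intro n
  induction n with
  | zero =>
      intro xs hl _
      have hxs : xs = [] := by cases xs with
        | nil => rfl
        | cons a t => simp at hl
      subst hxs
      simp [dcMax]
  | succ n ih =>
      intro xs hl h
      match xs with
      | [] => simp [dcMax]
      | [x] =>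
          simp only [dcMax, List.foldl]
          have := h x (by simp)
          omega
      | x :: y :: rest =>
          rw [dcMax]
          set m := (x :: y :: rest).length / 2 with hm
          have hlen : (x :: y :: rest).length = rest.length + 2 := by simp
          have hm1 : 1 ≤ m := by omega
          have hm2 : m ≤ rest.length + 1 := by omega
          have htake : ((x :: y :: rest).take m).length ≤ n := by
            simp only [List.length_take]
            simp only [List.length_cons] at hl ⊢
            omega
          have hdrop : ((x :: y :: rest).drop m).length ≤ n := by
            simp only [List.length_drop]
            simp only [List.length_cons] at hl ⊢
            omega
          rw [ih _ htake (fun z hz => h z (List.mem_of_mem_take hz)),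
              ih _ hdrop (fun z hz => h z (List.mem_of_mem_drop hz))]
          have hsplit := foldl_max_append ((x :: y :: rest).take m) ((x :: y :: rest).drop m)
          rw [List.take_append_drop] at hsplit
          rw [hsplit]
          split <;> omega

theorem dcMax_eq_foldl (xs : List Int) (h : ∀ x ∈ xs, 0 ≤ x) :
    dcMax xs = xs.foldl max 0 :=
  dcMaxAux xs.length xs le_rfl h

theorem inner_max (tweet : List String) (mc : Int) :
    tweet.foldl (fun mc word => if PySem.Str.len word > mc then PySem.Str.len word else mc) mc
      = (tweet.map (fun word => PySem.Str.len word)).foldl max mc := by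
  induction tweet generalizing mc with
  | nil => rfl
  | cons w t ih =>
      simp only [List.foldl, List.map]
      rw [ih]
      congr 1
      split_ifs <;> omega

theorem fused_eq (ts : List (List String)) (mw mc : Int) :
    ts.foldl (fun (acc : Int × Int) tweet =>
      let mw := if PySem.List.len tweet > acc.1 then PySem.List.len tweet else acc.1
      let mc := tweet.foldl (fun mc word =>
        if PySem.Str.len word > mc then PySem.Str.len word else mc) acc.2
      (mw, mc)) (mw, mc)
      = ((ts.map (fun tweet => PySem.List.len tweet)).foldl max mw,
         (ts.flatMap (fun tweet => tweet.map (fun word => PySem.Str.len word))).foldl max mc) := by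
  induction ts generalizing mw mc with
  | nil => rfl
  | cons t ts ih =>
      simp only [List.foldl, List.map, List.flatMap_cons, List.foldl_append]
      rw [ih, inner_max]
      congr 1
      congr 1
      split_ifs <;> omega

theorem build_eq (ts : List (List String)) (tl wl : List Int) :
    ts.foldl (fun (acc : List Int × List Int) tweet =>
        (acc.1 ++ [PySem.List.len tweet], acc.2 ++ tweet.map (fun w => PySem.Str.len w)))
      (tl, wl)
      = (tl ++ ts.map (fun tweet => PySem.List.len tweet),
         wl ++ ts.flatMap (fun tweet => tweet.map (fun w => PySem.Str.len w))) := by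
  induction ts generalizing tl wl with
  | nil => simp
  | cons t ts ih =>
      simp only [List.foldl, List.map, List.flatMap_cons]
      rw [ih]
      simp

-- ===== VERDICT (by name: the statement is the Claim_ definition above) =====
theorem get_max_lengths_spec : Claim_equal_get_max_lengths := by
  intro ts _
  show get_max_lengths ts = get_max_lengths_alt ts
  unfold get_max_lengths get_max_lengths_alt
  rw [fused_eq, build_eq]
  simp only [List.nil_append]
  have h1 : dcMax (ts.map (fun tweet => PySem.List.len tweet))
      = (ts.map (fun tweet => PySem.List.len tweet)).foldl max 0 := by
    apply dcMax_eq_foldl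
    intro x hx
    simp only [List.mem_map] at hx
    obtain ⟨t, _, rfl⟩ := hx
    simp [PySem.List.len]
  have h2 : dcMax (ts.flatMap (fun tweet => tweet.map (fun w => PySem.Str.len w)))
      = (ts.flatMap (fun tweet => tweet.map (fun w => PySem.Str.len w))).foldl max 0 := by
    apply dcMax_eq_foldl
    intro x hx
    simp only [List.mem_flatMap, List.mem_map] at hx
    obtain ⟨t, _, w, _, rfl⟩ := hx
    simp [PySem.Str.len]
  rw [h1, h2]
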